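-- pv_equiv track=rewrite | github.com/yjcyxky/research-hub-mcp | benches/ner/biomed_gliner_eval.py | parse_conll_data
-- ===== SOURCE A (Python) =====
-- from typing import Any
--
-- def parse_conll_data(content: str) -> list[dict[str, Any]]:
--     """
--     Parse CoNLL format data into tokens and tags.
--
--     Args:
--         content: Raw CoNLL format text (tab-separated, blank lines between sentences)
--
--     Returns:
--         List of examples with tokens and tags
--     """
--     examples = []
--     current_tokens: list[str] = []
--     current_tags: list[str] = []
--
--     for line in content.strip().split("\n"):
--         line = line.strip()
--         if not line:
--             # End of sentence
--             if current_tokens: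
--                 examples.append({
--                     "tokens": current_tokens,
--                     "tags": current_tags,
--                 })
--                 current_tokens = []
--                 current_tags = []
--         else:
--             parts = line.split("\t")
--             if len(parts) >= 2:
--                 current_tokens.append(parts[0])
--                 current_tags.append(parts[1])
--
--     # Add last sentence if any
--     if current_tokens:
--         examples.append({
--             "tokens": current_tokens,
--             "tags": current_tags,
--         })
--
--     return examples
-- ===== SOURCE B (Python) =====
-- def parse_conll_data(content: str) -> list[dict[str, list[str]]]:
--     """Group-first decomposition: split stripped lines into blocks at blank
--     lines, then turn each block into an example (skipping empty blocks)."""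
--     lines = [line.strip() for line in content.strip().split("\n")]
--     # group non-blank lines into blocks; a blank line ends the current block
--     blocks: list[list[str]] = []
--     cur: list[str] = []
--     for line in lines:
--         if line:
--             cur.append(line)
--         else:
--             blocks.append(cur)
--             cur = []
--     blocks.append(cur)
--     # transform each block independently
--     examples = []
--     for block in blocks:
--         pairs = [p for p in (line.split("\t") for line in block) if len(p) >= 2]
--         if pairs:
--             examples.append({
--                 "tokens": [p[0] for p in pairs],
--                 "tags": [p[1] for p in pairs],
--             })
--     return examples
-- ===== Notes on version B (the rewrite author's own statement) =====
-- stated objective: alternative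
-- what changed: Replaces A's running accumulator with blank-line flush (current_tokens/current_tags mutated and flushed both mid-loop and after the loop) by a group-first decomposition: split the stripped lines into blank-line-separated blocks, then independently transform each block into an example, skipping blocks with no qualifying lines.
import Mathlib
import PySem

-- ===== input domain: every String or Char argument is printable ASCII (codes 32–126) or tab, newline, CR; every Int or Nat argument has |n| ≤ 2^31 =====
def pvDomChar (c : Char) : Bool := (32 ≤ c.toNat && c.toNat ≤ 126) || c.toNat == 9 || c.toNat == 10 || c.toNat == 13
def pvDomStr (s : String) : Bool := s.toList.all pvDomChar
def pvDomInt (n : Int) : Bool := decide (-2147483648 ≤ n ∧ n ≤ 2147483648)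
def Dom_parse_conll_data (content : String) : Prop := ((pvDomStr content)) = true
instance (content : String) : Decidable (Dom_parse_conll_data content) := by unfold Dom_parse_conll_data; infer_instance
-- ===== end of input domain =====

-- B replaces A's running-accumulator-with-flush loop by a group-first decomposition
-- (split into blank-line-separated blocks, then transform each block); objective: alternative.

-- s.split(sep) for a non-empty literal sep (PySem.Str.split? is none only for sep = "")
def pvSplit (s sep : String) : List String := (PySem.Str.split? s sep).getD []

-- ===== PORT A =====
-- loop body: strip the line; a blank line flushes the current sentence, a line with ≥2
-- tab-separated parts extends current_tokens/current_tags
def pvStepA (st : List (List (String × List String)) × List String × List String)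
    (line : String) : List (List (String × List String)) × List String × List String :=
  let line := PySem.Str.strip line
  if line = "" then
    if st.2.1 ≠ [] then
      (st.1 ++ [[("tokens", st.2.1), ("tags", st.2.2)]], [], [])
    else st
  else
    let parts := pvSplit line "\t"
    if 2 ≤ parts.length then
      (st.1, st.2.1 ++ [PySem.List.pyGetD parts 0 ""], st.2.2 ++ [PySem.List.pyGetD parts 1 ""])
    else st

-- trailing "add last sentence if any"
def pvFlushA (st : List (List (String × List String)) × List String × List String) :
    List (List (String × List String)) :=
  if st.2.1 ≠ [] then st.1 ++ [[("tokens", st.2.1), ("tags", st.2.2)]] else st.1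

def parse_conll_data (content : String) : List (List (String × List String)) :=
  pvFlushA ((pvSplit (PySem.Str.strip content) "\n").foldl pvStepA ([], [], []))

-- ===== PORT B =====
-- grouping loop: a non-blank (stripped) line extends the current block, a blank line ends it
def pvStepB (st : List (List String) × List String) (line : String) :
    List (List String) × List String :=
  if line ≠ "" then (st.1, st.2 ++ [line]) else (st.1 ++ [st.2], [])

-- per-block transform: keep tab-split lines with ≥2 parts; append an example iff any remain
def pvProcStep (exs : List (List (String × List String))) (block : List String) :
    List (List (String × List String)) :=
  let pairs := (block.map (fun line => pvSplit line "\t")).filter (fun p => 2 ≤ p.length)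
  if pairs ≠ [] then
    exs ++ [[("tokens", pairs.map (fun p => PySem.List.pyGetD p 0 "")),
             ("tags", pairs.map (fun p => PySem.List.pyGetD p 1 ""))]]
  else exs

def parse_conll_data_alt (content : String) : List (List (String × List String)) :=
  let lines := (pvSplit (PySem.Str.strip content) "\n").map PySem.Str.strip
  let st := lines.foldl pvStepB ([], [])
  (st.1 ++ [st.2]).foldl pvProcStep []

-- ===== PRECONDITION & SPEC =====
def Spec_parse_conll_data (content : String) (out : List (List (String × List String))) : Prop := out = parse_conll_data_alt content
instance (content : String) (out : List (List (String × List String))) : Decidable (Spec_parse_conll_data content out) := by unfold Spec_parse_conll_data; infer_instance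

-- ===== CLAIM (what is proved, stated in full; the proofs are below) =====
def Claim_equal_parse_conll_data : Prop := ∀ (content : String), Dom_parse_conll_data content → Spec_parse_conll_data content (parse_conll_data content)

-- ===== LEMMAS AND PROOFS =====

-- qualifying tab-split lines of a block
def pvPairs (cur : List String) : List (List String) :=
  (cur.map (fun line => pvSplit line "\t")).filter (fun p => 2 ≤ p.length)

def pvToks (cur : List String) : List String := (pvPairs cur).map (fun p => PySem.List.pyGetD p 0 "")
def pvTags (cur : List String) : List String := (pvPairs cur).map (fun p => PySem.List.pyGetD p 1 "")

-- the example(s) a block contributes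
def pvProc (cur : List String) : List (List (String × List String)) :=
  if pvPairs cur ≠ [] then [[("tokens", pvToks cur), ("tags", pvTags cur)]] else []

-- result of the remaining scan, given the pending block `cur` (lines already stripped)
def pvRun : List String → List String → List (List (String × List String))
  | [], cur => pvProc cur
  | l :: L, cur => if l = "" then pvProc cur ++ pvRun L [] else pvRun L (cur ++ [l])

-- pvStepA on an already-stripped line
def pvStepA' (st : List (List (String × List String)) × List String × List String)
    (line : String) : List (List (String × List String)) × List String × List String :=
  if line = "" then
    if st.2.1 ≠ [] then
      (st.1 ++ [[("tokens", st.2.1), ("tags", st.2.2)]], [], [])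
    else st
  else
    let parts := pvSplit line "\t"
    if 2 ≤ parts.length then
      (st.1, st.2.1 ++ [PySem.List.pyGetD parts 0 ""], st.2.2 ++ [PySem.List.pyGetD parts 1 ""])
    else st

theorem pvToks_nil_iff (cur : List String) : pvToks cur = [] ↔ pvPairs cur = [] := by
  simp [pvToks]

theorem pvTags_of_pairs_nil (cur : List String) (h : pvPairs cur = []) : pvTags cur = [] := by
  simp [pvTags, h]

-- the blocks accumulator of B's grouping loop factors out as a prefix
theorem pvStepB_acc (L : List String) (bs : List (List String)) (cur : List String) :
    L.foldl pvStepB (bs, cur)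
      = (bs ++ (L.foldl pvStepB ([], cur)).1, (L.foldl pvStepB ([], cur)).2) := by
  induction L generalizing bs cur with
  | nil => simp
  | cons l L ih =>
    by_cases h : l = ""
    · simp only [List.foldl_cons, pvStepB, h, ne_eq, not_true_eq_false, if_false,
        List.nil_append]
      rw [ih (bs ++ [cur]) [], ih [cur] []]
      simp
    · simp only [List.foldl_cons, pvStepB, h, ne_eq, not_false_eq_true, if_true]
      exact ih bs (cur ++ [l])

-- B's per-block loop is exs ++ concatenation of pvProc over the blocks
theorem pvProcStep_foldl (blocks : List (List String)) (exs : List (List (String × List String))) :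
    blocks.foldl pvProcStep exs = exs ++ (blocks.map pvProc).flatten := by
  induction blocks generalizing exs with
  | nil => simp
  | cons b blocks ih =>
    have hb : pvProcStep exs b = exs ++ pvProc b := by
      simp only [pvProcStep, pvProc, pvPairs, pvToks, pvTags]
      split_ifs <;> simp
    simp [ih, hb]

-- B's grouping-then-transform equals the block recursion pvRun
theorem pvB_run (L : List String) (cur : List String) :
    (((L.foldl pvStepB ([], cur)).1 ++ [(L.foldl pvStepB ([], cur)).2]).map pvProc).flatten
      = pvRun L cur := by
  induction L generalizing cur with
  | nil => simp [pvRun]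
  | cons l L ih =>
    by_cases h : l = ""
    · simp only [List.foldl_cons, pvStepB, h, ne_eq, not_true_eq_false, if_false,
        List.nil_append]
      rw [pvStepB_acc L [cur] []]
      simp only [pvRun, if_true]
      rw [← ih []]
      simp
    · simp only [List.foldl_cons, pvStepB, h, ne_eq, not_false_eq_true, if_true,
        pvRun, if_false]
      exact ih (cur ++ [l])

-- A's accumulator fold, started mid-sentence, equals ex ++ pvRun (lines already stripped)
theorem pvA_run (L : List String) (ex : List (List (String × List String))) (cur : List String) :
    pvFlushA (L.foldl pvStepA' (ex, pvToks cur, pvTags cur)) = ex ++ pvRun L cur := by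
  induction L generalizing ex cur with
  | nil =>
    by_cases h : pvPairs cur = []
    · simp [pvFlushA, pvRun, pvProc, h, (pvToks_nil_iff cur).2 h]
    · have ht : pvToks cur ≠ [] := fun hc => h ((pvToks_nil_iff cur).1 hc)
      simp [pvFlushA, pvRun, pvProc, h, ht]
  | cons l L ih =>
    by_cases h : l = ""
    · by_cases hp : pvPairs cur = []
      · have ht := (pvToks_nil_iff cur).2 hp
        have htg := pvTags_of_pairs_nil cur hp
        have hstep : pvStepA' (ex, pvToks cur, pvTags cur) l
            = (ex, pvToks ([] : List String), pvTags ([] : List String)) := by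
          subst h
          simp only [pvStepA']
          rw [if_pos trivial, if_neg (not_not_intro ht), ht, htg]
          rfl
        rw [List.foldl_cons, hstep, ih]
        simp [pvRun, h, pvProc, hp]
      · have ht : pvToks cur ≠ [] := fun hc => hp ((pvToks_nil_iff cur).1 hc)
        have hstep : pvStepA' (ex, pvToks cur, pvTags cur) l
            = (ex ++ [[("tokens", pvToks cur), ("tags", pvTags cur)]],
               pvToks ([] : List String), pvTags ([] : List String)) := by
          subst h
          simp only [pvStepA']
          rw [if_pos trivial, if_pos ht]
          rfl
        rw [List.foldl_cons, hstep, ih]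
        simp [pvRun, h, pvProc, hp]
    · have hstep : pvStepA' (ex, pvToks cur, pvTags cur) l
          = (ex, pvToks (cur ++ [l]), pvTags (cur ++ [l])) := by
        by_cases h2 : 2 ≤ (pvSplit l "\t").length
        · simp [pvStepA', h, h2, pvToks, pvTags, pvPairs]
        · simp [pvStepA', h, h2, pvToks, pvTags, pvPairs]
      rw [List.foldl_cons, hstep, ih]
      simp [pvRun, h]

-- ===== VERDICT (by name: the statement is the Claim_ definition above) =====
theorem parse_conll_data_spec : Claim_equal_parse_conll_data := by
  intro content _
  unfold Spec_parse_conll_data parse_conll_data parse_conll_data_alt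
  rw [show pvStepA = fun st l => pvStepA' st (PySem.Str.strip l) from rfl, ← List.foldl_map]
  rw [show (([], [], []) : List (List (String × List String)) × List String × List String)
        = (([], pvToks [], pvTags []) : _) by simp [pvToks, pvTags, pvPairs]]
  rw [pvA_run]
  rw [pvProcStep_foldl, pvB_run]
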